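-- pv_equiv track=rewrite | github.com/saladfist/Computerpraktikum | programs/functions.py | drop_clusters
-- ===== SOURCE A (Python) =====
-- def drop_clusters(B,h_dict,rho,epsilon,data,delta,dimension): #drop B if it contains no h with h geq ρ + 2ε; B contains cube indices
--     remaining_clusters=[]
--     for cluster in B:
--         # For each cube in cluster, find max h-value among points in that cube
--         max_h = 0
--         for point_idx, h in h_dict.items():
--             if point_idx in cluster:
--                 max_h = max(max_h, h)
--         if max_h >= rho + 2 * epsilon:
--             remaining_clusters.append(cluster)
--     return remaining_clusters
-- ===== SOURCE B (Python) =====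
-- def drop_clusters(B, h_dict, rho, epsilon, data, delta, dimension):
--     threshold = rho + 2 * epsilon
--     if threshold <= 0:
--         return list(B)
--     good = {idx for idx, h in h_dict.items() if h >= threshold}
--     return [cluster for cluster in B if any(x in good for x in cluster)]
-- ===== Notes on version B (the rewrite author's own statement) =====
-- stated objective: faster
-- what changed: Builds the set of qualifying point indices once from h_dict and keeps clusters by membership test (returning all of B when the threshold is non-positive), instead of recomputing the max h-value over all of h_dict for every cluster.
import Mathlib
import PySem

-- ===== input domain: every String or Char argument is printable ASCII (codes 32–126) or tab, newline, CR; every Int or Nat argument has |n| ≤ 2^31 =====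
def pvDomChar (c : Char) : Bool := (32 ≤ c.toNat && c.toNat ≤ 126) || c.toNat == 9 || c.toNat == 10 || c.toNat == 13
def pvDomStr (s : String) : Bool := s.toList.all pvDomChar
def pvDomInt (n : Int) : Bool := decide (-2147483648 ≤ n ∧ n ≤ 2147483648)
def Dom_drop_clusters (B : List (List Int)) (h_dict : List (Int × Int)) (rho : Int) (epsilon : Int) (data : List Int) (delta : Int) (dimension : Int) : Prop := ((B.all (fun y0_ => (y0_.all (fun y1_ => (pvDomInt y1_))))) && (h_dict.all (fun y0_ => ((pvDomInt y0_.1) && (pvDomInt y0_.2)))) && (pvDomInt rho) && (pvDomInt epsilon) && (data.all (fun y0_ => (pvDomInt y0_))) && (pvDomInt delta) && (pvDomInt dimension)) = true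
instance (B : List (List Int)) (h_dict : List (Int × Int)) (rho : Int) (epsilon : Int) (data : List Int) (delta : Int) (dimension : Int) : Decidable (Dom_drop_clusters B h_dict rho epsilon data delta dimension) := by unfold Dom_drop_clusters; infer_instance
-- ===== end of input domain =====

-- B builds the set of qualifying indices once and keeps clusters by membership test
-- (returning all of B when the threshold is non-positive), instead of rescanning h_dict per cluster.

-- ===== PORT A =====
def drop_clusters (B : List (List Int)) (h_dict : List (Int × Int)) (rho : Int) (epsilon : Int) (data : List Int) (delta : Int) (dimension : Int) : List (List Int) :=
  B.foldl (fun remaining_clusters cluster =>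
    let max_h := h_dict.foldl (fun max_h p => if p.1 ∈ cluster then max max_h p.2 else max_h) 0
    if max_h ≥ rho + 2 * epsilon then remaining_clusters ++ [cluster] else remaining_clusters) []

-- ===== PORT B =====
def drop_clusters_alt (B : List (List Int)) (h_dict : List (Int × Int)) (rho : Int) (epsilon : Int) (data : List Int) (delta : Int) (dimension : Int) : List (List Int) :=
  let threshold := rho + 2 * epsilon
  if threshold ≤ 0 then B
  else
    let good : PySem.Set Int := PySem.Set.ofList ((h_dict.filter (fun p => p.2 ≥ threshold)).map Prod.fst)
    B.filter (fun cluster => cluster.any (fun x => PySem.Set.contains good x))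

-- ===== PRECONDITION & SPEC =====
def Spec_drop_clusters (B : List (List Int)) (h_dict : List (Int × Int)) (rho : Int) (epsilon : Int) (data : List Int) (delta : Int) (dimension : Int) (out : List (List Int)) : Prop := out = drop_clusters_alt B h_dict rho epsilon data delta dimension
instance (B : List (List Int)) (h_dict : List (Int × Int)) (rho : Int) (epsilon : Int) (data : List Int) (delta : Int) (dimension : Int) (out : List (List Int)) : Decidable (Spec_drop_clusters B h_dict rho epsilon data delta dimension out) := by unfold Spec_drop_clusters; infer_instance

-- ===== CLAIM (what is proved, stated in full; the proofs are below) =====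
def Claim_equal_drop_clusters : Prop := ∀ (B : List (List Int)) (h_dict : List (Int × Int)) (rho : Int) (epsilon : Int) (data : List Int) (delta : Int) (dimension : Int), Dom_drop_clusters B h_dict rho epsilon data delta dimension → Spec_drop_clusters B h_dict rho epsilon data delta dimension (drop_clusters B h_dict rho epsilon data delta dimension)

-- ===== LEMMAS AND PROOFS =====

-- A's inner scan of h_dict, started at a, reaches T iff a already does or some pair qualifies.
theorem maxfold_ge_iff (l : List (Int × Int)) (c : List Int) (T a : Int) :
    T ≤ l.foldl (fun m p => if p.1 ∈ c then max m p.2 else m) a ↔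
      T ≤ a ∨ ∃ p ∈ l, p.1 ∈ c ∧ T ≤ p.2 := by
  induction l generalizing a with
  | nil => simp
  | cons hd tl ih =>
    simp only [List.foldl_cons]
    rw [ih]
    by_cases h : hd.1 ∈ c
    · simp [h]
      try tauto
    · simp [h]
      try tauto

-- membership in B's precomputed set of qualifying indices
theorem mem_good_iff (h_dict : List (Int × Int)) (T x : Int) :
    x ∈ PySem.Set.ofList ((h_dict.filter (fun p => p.2 ≥ T)).map Prod.fst) ↔
      ∃ p ∈ h_dict, p.1 = x ∧ T ≤ p.2 := by
  rw [PySem.Set.mem_ofList]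
  simp [List.mem_map, List.mem_filter]
  try tauto

-- ===== VERDICT (by name: the statement is the Claim_ definition above) =====
theorem drop_clusters_spec : Claim_equal_drop_clusters := by
  intro B h_dict rho epsilon data delta dimension _
  unfold Spec_drop_clusters drop_clusters drop_clusters_alt
  simp only []
  rw [PySem.List.foldl_append_ite_eq_filter]
  by_cases hT : rho + 2 * epsilon ≤ 0
  · simp only [if_pos hT, List.nil_append]
    rw [List.filter_eq_self]
    intro c _
    simp only [decide_eq_true_eq, ge_iff_le]
    rw [maxfold_ge_iff]
    exact Or.inl hT
  · simp only [if_neg hT, List.nil_append]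
    apply List.filter_congr
    intro c _
    rw [Bool.eq_iff_iff]
    simp only [decide_eq_true_eq, ge_iff_le]
    rw [maxfold_ge_iff]
    simp only [hT, false_or]
    rw [List.any_eq_true]
    constructor
    · rintro ⟨p, hp, hpc, hT2⟩
      exact ⟨p.1, hpc, by rw [PySem.Set.contains_iff, mem_good_iff]; exact ⟨p, hp, rfl, hT2⟩⟩
    · rintro ⟨x, hx, hgood⟩
      rw [PySem.Set.contains_iff, mem_good_iff] at hgood
      obtain ⟨p, hp, rfl, hT2⟩ := hgood
      exact ⟨p, hp, hx, hT2⟩
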